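-- pv_equiv track=rewrite | github.com/stojan97/advent-of-code-2023 | day-2/solution.py | part1
-- ===== SOURCE A (Python) =====
-- def part1(games):
--     limits = [12, 13, 14]
--
--     def is_possible(subsets):
--         for s in subsets:
--             for i in range(3):
--                 if s[i] > limits[i]:
--                     return False
--         return True
--
--     return sum((idx + 1 if is_possible(g) else 0) for idx, g in enumerate(games))
-- ===== SOURCE B (Python) =====
-- def part1(games):
--     total = 0
--     for idx, g in enumerate(games):
--         mr = mg = mb = 0
--         for r, gr, b in g:
--             mr = max(mr, r)
--             mg = max(mg, gr)
--             mb = max(mb, b)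
--         if mr <= 12 and mg <= 13 and mb <= 14:
--             total += idx + 1
--     return total
-- ===== Notes on version B (the rewrite author's own statement) =====
-- stated objective: idiomatic
-- what changed: Replaces the early-return per-subset limit check with a per-color running-maxima reduction over all subsets followed by a single triple comparison against the limits.
import Mathlib
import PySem

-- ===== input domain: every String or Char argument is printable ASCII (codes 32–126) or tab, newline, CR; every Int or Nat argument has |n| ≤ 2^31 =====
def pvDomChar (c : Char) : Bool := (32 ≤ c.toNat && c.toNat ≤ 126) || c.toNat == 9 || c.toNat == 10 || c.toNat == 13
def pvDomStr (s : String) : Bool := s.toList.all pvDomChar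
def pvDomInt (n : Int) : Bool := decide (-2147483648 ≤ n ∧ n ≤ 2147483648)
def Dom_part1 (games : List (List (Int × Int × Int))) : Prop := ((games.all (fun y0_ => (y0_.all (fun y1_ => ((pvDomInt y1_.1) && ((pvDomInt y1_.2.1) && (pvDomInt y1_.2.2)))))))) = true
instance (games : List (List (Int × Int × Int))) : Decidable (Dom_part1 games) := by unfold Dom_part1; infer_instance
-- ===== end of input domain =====

-- B replaces A's early-return per-subset limit check with a per-color running-maxima
-- reduction followed by one triple comparison (idiomatic reduction; same cost).

-- ===== PORT A =====
-- is_possible: loop over subsets; inner loop 'for i in range(3)' unrolled over the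
-- three tuple components, returning False as soon as s[i] > limits[i].
def isPossibleA (subsets : List (Int × Int × Int)) : Bool :=
  match subsets with
  | [] => true
  | s :: rest =>
    if s.1 > 12 then false
    else if s.2.1 > 13 then false
    else if s.2.2 > 14 then false
    else isPossibleA rest

def part1 (games : List (List (Int × Int × Int))) : Int :=
  (PySem.List.enumerate games).foldl
    (fun acc p => acc + (if isPossibleA p.2 then p.1 + 1 else 0)) 0

-- ===== PORT B =====
-- running per-color maxima over a game's subsets, seeded at (0,0,0)
def maximaB (g : List (Int × Int × Int)) : Int × Int × Int :=
  g.foldl (fun m s => (max m.1 s.1, max m.2.1 s.2.1, max m.2.2 s.2.2)) (0, 0, 0)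

def part1_alt (games : List (List (Int × Int × Int))) : Int :=
  (PySem.List.enumerate games).foldl
    (fun acc p =>
      let m := maximaB p.2
      acc + (if m.1 ≤ 12 ∧ m.2.1 ≤ 13 ∧ m.2.2 ≤ 14 then p.1 + 1 else 0)) 0

-- ===== PRECONDITION & SPEC =====
def Spec_part1 (games : List (List (Int × Int × Int))) (out : Int) : Prop := out = part1_alt games
instance (games : List (List (Int × Int × Int))) (out : Int) : Decidable (Spec_part1 games out) := by unfold Spec_part1; infer_instance

-- ===== CLAIM (what is proved, stated in full; the proofs are below) =====
def Claim_equal_part1 : Prop := ∀ (games : List (List (Int × Int × Int))), Dom_part1 games → Spec_part1 games (part1 games)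

-- ===== LEMMAS AND PROOFS =====

theorem maxima_fold_within (g : List (Int × Int × Int)) :
    ∀ m : Int × Int × Int,
      (let r := g.foldl (fun m s => (max m.1 s.1, max m.2.1 s.2.1, max m.2.2 s.2.2)) m
       r.1 ≤ 12 ∧ r.2.1 ≤ 13 ∧ r.2.2 ≤ 14)
      ↔ ((m.1 ≤ 12 ∧ m.2.1 ≤ 13 ∧ m.2.2 ≤ 14) ∧ isPossibleA g = true) := by
  induction g with
  | nil => intro m; simp [isPossibleA]
  | cons s rest ih =>
    rintro ⟨a, b, c⟩
    rcases s with ⟨x, y, z⟩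
    simp only [List.foldl_cons]
    rw [ih]
    by_cases h1 : x > 12
    · simp only [isPossibleA, if_pos h1]
      constructor
      · rintro ⟨⟨hm, -, -⟩, -⟩; omega
      · rintro ⟨-, h⟩; cases h
    · by_cases h2 : y > 13
      · simp only [isPossibleA, if_neg h1, if_pos h2]
        constructor
        · rintro ⟨⟨-, hm, -⟩, -⟩; omega
        · rintro ⟨-, h⟩; cases h
      · by_cases h3 : z > 14
        · simp only [isPossibleA, if_neg h1, if_neg h2, if_pos h3]
          constructor
          · rintro ⟨⟨-, -, hm⟩, -⟩; omega
          · rintro ⟨-, h⟩; cases h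
        · simp only [isPossibleA, if_neg h1, if_neg h2, if_neg h3]
          constructor
          · rintro ⟨⟨hx, hy, hz⟩, hq⟩
            refine ⟨⟨?_, ?_, ?_⟩, hq⟩ <;> simp at hx hy hz <;> omega
          · rintro ⟨⟨hx, hy, hz⟩, hq⟩
            refine ⟨⟨?_, ?_, ?_⟩, hq⟩ <;> simp <;> omega

theorem possible_iff_maxima (g : List (Int × Int × Int)) :
    ((maximaB g).1 ≤ 12 ∧ (maximaB g).2.1 ≤ 13 ∧ (maximaB g).2.2 ≤ 14) ↔ isPossibleA g = true := by
  have h := maxima_fold_within g (0, 0, 0)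
  simp only [maximaB]
  rw [h]
  norm_num

theorem fold_eq (l : List (Int × List (Int × Int × Int))) :
    ∀ acc : Int,
      l.foldl (fun acc p => acc + (if isPossibleA p.2 then p.1 + 1 else 0)) acc
      = l.foldl (fun acc p =>
          let m := maximaB p.2
          acc + (if m.1 ≤ 12 ∧ m.2.1 ≤ 13 ∧ m.2.2 ≤ 14 then p.1 + 1 else 0)) acc := by
  induction l with
  | nil => intro acc; rfl
  | cons p rest ih =>
    intro acc
    simp only [List.foldl_cons]
    rw [ih]
    congr 2
    by_cases hp : (maximaB p.2).1 ≤ 12 ∧ (maximaB p.2).2.1 ≤ 13 ∧ (maximaB p.2).2.2 ≤ 14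
    · rw [if_pos ((possible_iff_maxima p.2).mp hp), if_pos hp]
    · rw [if_neg (fun h => hp ((possible_iff_maxima p.2).mpr h)), if_neg hp]

-- ===== VERDICT (by name: the statement is the Claim_ definition above) =====
theorem part1_spec : Claim_equal_part1 := by
  intro games _
  unfold Spec_part1 part1 part1_alt
  exact fold_eq (PySem.List.enumerate games) 0
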